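-- pv_equiv track=rewrite | github.com/alexgolec/career-advice | code/interview-problems/synonymous-queries/transitivity_disjoint_set.py | synonym_queries
-- ===== SOURCE A (Python) =====
-- class DisjointSet(object):
--     def __init__(self):
--         self.parents = {}
--
--     def get_root(self, w):
--         words_traversed = []
--         while w in self.parents and self.parents[w] != w:
--             words_traversed.append(w)
--             w = self.parents[w]
--         for word in words_traversed:
--             self.parents[word] = w
--         return w
--
--     def add_synonyms(self, w1, w2):
--         if w1 not in self.parents:
--             self.parents[w1] = w1
--         if w2 not in self.parents:
--             self.parents[w2] = w2
--
--         w1_root = self.get_root(w1)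
--         w2_root = self.get_root(w2)
--         if w1_root < w2_root:
--             w1_root, w2_root = w2_root, w1_root
--         self.parents[w2_root] = w1_root
--
--     def are_synonymous(self, w1, w2):
--         return self.get_root(w1) == self.get_root(w2)
--
-- def preprocess_synonyms(synonym_words):
--     ds = DisjointSet()
--     for w1, w2 in synonym_words:
--         ds.add_synonyms(w1, w2)
--     return ds
--
-- def synonym_queries(synonym_words, queries):
--     '''
--     synonym_words: iterable of pairs of strings representing synonymous words
--     queries: iterable of pairs of strings representing queries to be tested for
--              synonymous-ness
--     '''
--     synonyms = preprocess_synonyms(synonym_words)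
--
--     output = []
--     for q1, q2 in queries:
--         q1, q2 = q1.split(), q2.split()
--         if len(q1) != len(q2):
--             output.append(False)
--             continue
--         result = True
--         for i in range(len(q1)):
--             w1, w2 = q1[i], q2[i]
--             if w1 == w2:
--                 continue
--             elif synonyms.are_synonymous(w1, w2):
--                 continue
--             result = False
--             break
--         output.append(result)
--     return output
-- ===== SOURCE B (Python) =====
-- def synonym_queries(synonym_words, queries):
--     # Flat component labels with union-by-size relabelling (no parent trees,
--     # no path compression): comp maps each seen word to its component label,
--     # members maps each live label to the words carrying it.
--     comp = {}
--     members = {}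
--     for w1, w2 in synonym_words:
--         for w in (w1, w2):
--             if w not in comp:
--                 comp[w] = w
--                 members[w] = [w]
--         r1, r2 = comp[w1], comp[w2]
--         if r1 != r2:
--             if len(members[r1]) < len(members[r2]):
--                 r1, r2 = r2, r1
--             for w in members[r2]:
--                 comp[w] = r1
--             members[r1].extend(members.pop(r2))
--     out = []
--     for q1, q2 in queries:
--         a, b = q1.split(), q2.split()
--         out.append(len(a) == len(b) and all(
--             x == y or comp.get(x, x) == comp.get(y, y)
--             for x, y in zip(a, b)))
--     return out
-- ===== Notes on version B (the rewrite author's own statement) =====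
-- stated objective: alternative
-- what changed: Replaces the parent-pointer disjoint-set (root chasing with path compression, union ordered by string comparison) with flat component labels: a comp dict giving each word its label plus per-label member lists, merging by relabelling the smaller component in place; queries compare labels directly with comp.get(w, w).
import Mathlib
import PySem

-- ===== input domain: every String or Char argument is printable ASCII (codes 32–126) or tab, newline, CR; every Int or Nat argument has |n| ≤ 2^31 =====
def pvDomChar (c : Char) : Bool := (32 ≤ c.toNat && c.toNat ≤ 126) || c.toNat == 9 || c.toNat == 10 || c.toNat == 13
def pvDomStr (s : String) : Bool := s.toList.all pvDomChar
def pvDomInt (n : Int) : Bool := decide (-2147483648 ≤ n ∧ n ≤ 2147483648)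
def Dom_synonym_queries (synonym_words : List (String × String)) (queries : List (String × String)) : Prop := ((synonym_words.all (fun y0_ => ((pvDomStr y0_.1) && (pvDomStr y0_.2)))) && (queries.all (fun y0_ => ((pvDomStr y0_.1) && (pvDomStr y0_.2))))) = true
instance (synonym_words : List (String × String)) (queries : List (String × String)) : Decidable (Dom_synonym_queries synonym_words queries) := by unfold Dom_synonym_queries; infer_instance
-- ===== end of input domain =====

-- B replaces A's parent-pointer disjoint set (root chasing + path compression) by flat
-- component labels merged by relabelling the smaller component (objective: alternative).

-- ===== PORT A =====
-- the while-loop of get_root: returns (words_traversed, final w); fuel P.size + 1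
-- always suffices because parent chains are acyclic (proved below via a rank argument)
def pvRootF (P : PySem.Dict String String) : Nat → String → List String × String
  | 0, w => ([], w)
  | n + 1, w =>
    match P.get? w with
    | none => ([], w)
    | some p =>
      if p = w then ([], w)
      else
        let tr := pvRootF P n p
        (w :: tr.1, tr.2)

-- DisjointSet.get_root (returns the new parents dict and the root)
def pvGetRoot (P : PySem.Dict String String) (w : String) : PySem.Dict String String × String :=
  let tr := pvRootF P (P.size + 1) w
  (tr.1.foldl (fun Q word => Q.insert word tr.2) P, tr.2)

-- DisjointSet.add_synonyms
def pvAddSynonyms (P : PySem.Dict String String) (w1 w2 : String) : PySem.Dict String String :=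
  let P := if P.contains w1 then P else P.insert w1 w1
  let P := if P.contains w2 then P else P.insert w2 w2
  let g1 := pvGetRoot P w1
  let g2 := pvGetRoot g1.1 w2
  let rr := if g1.2 < g2.2 then (g2.2, g1.2) else (g1.2, g2.2)
  g2.1.insert rr.2 rr.1

-- DisjointSet.are_synonymous (threads the mutated parents dict)
def pvAreSynonymous (P : PySem.Dict String String) (w1 w2 : String) : PySem.Dict String String × Bool :=
  let g1 := pvGetRoot P w1
  let g2 := pvGetRoot g1.1 w2
  (g2.1, g1.2 == g2.2)

-- the inner for-i loop over the words of one query (with its early break)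
def pvQueryLoop : PySem.Dict String String → List String → List String → PySem.Dict String String × Bool
  | P, w1 :: t1, w2 :: t2 =>
    if w1 = w2 then pvQueryLoop P t1 t2
    else
      let ab := pvAreSynonymous P w1 w2
      if ab.2 then pvQueryLoop ab.1 t1 t2 else (ab.1, false)
  | P, _, _ => (P, true)

def synonym_queries (synonym_words : List (String × String)) (queries : List (String × String)) : List Bool :=
  let P := synonym_words.foldl (fun P p => pvAddSynonyms P p.1 p.2) PySem.Dict.empty
  (queries.foldl (fun acc q =>
      let q1 := PySem.Str.split₀ q.1
      let q2 := PySem.Str.split₀ q.2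
      if q1.length ≠ q2.length then (acc.1, acc.2 ++ [false])
      else
        let rb := pvQueryLoop acc.1 q1 q2
        (rb.1, acc.2 ++ [rb.2]))
    (P, ([] : List Bool))).2

-- ===== PORT B =====
-- 'for w in (w1, w2): if w not in comp: comp[w] = w; members[w] = [w]'
def pvCompAdd (s : PySem.Dict String String × PySem.Dict String (List String)) (w : String) :
    PySem.Dict String String × PySem.Dict String (List String) :=
  if s.1.contains w then s else (s.1.insert w w, s.2.insert w [w])

-- one synonym pair: relabel the smaller component ('comp[w1]' cannot raise, both keys
-- were just ensured present, so the lookup is ported as getD with a dummy default)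
def pvMergeStep (s : PySem.Dict String String × PySem.Dict String (List String)) (w1 w2 : String) :
    PySem.Dict String String × PySem.Dict String (List String) :=
  let s := pvCompAdd (pvCompAdd s w1) w2
  let comp := s.1
  let members := s.2
  let r1 := comp.getD w1 ""
  let r2 := comp.getD w2 ""
  if r1 ≠ r2 then
    let rr := if (members.getD r1 []).length < (members.getD r2 []).length then (r2, r1) else (r1, r2)
    let comp := (members.getD rr.2 []).foldl (fun c w => c.insert w rr.1) comp
    -- 'members[r1].extend(members.pop(r2))'
    let m2 := members.getD rr.2 []
    let members := members.erase rr.2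
    (comp, members.insert rr.1 (members.getD rr.1 [] ++ m2))
  else (comp, members)

def pvCompGet (comp : PySem.Dict String String) (w : String) : String := comp.getD w w

def synonym_queries_alt (synonym_words : List (String × String)) (queries : List (String × String)) : List Bool :=
  let s := synonym_words.foldl (fun s p => pvMergeStep s p.1 p.2) (PySem.Dict.empty, PySem.Dict.empty)
  queries.map (fun q =>
    let a := PySem.Str.split₀ q.1
    let b := PySem.Str.split₀ q.2
    a.length == b.length && (a.zip b).all (fun p => p.1 == p.2 || pvCompGet s.1 p.1 == pvCompGet s.1 p.2))

-- ===== PRECONDITION & SPEC =====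
def Spec_synonym_queries (synonym_words : List (String × String)) (queries : List (String × String)) (out : List Bool) : Prop := out = synonym_queries_alt synonym_words queries
instance (synonym_words : List (String × String)) (queries : List (String × String)) (out : List Bool) : Decidable (Spec_synonym_queries synonym_words queries out) := by unfold Spec_synonym_queries; infer_instance

-- ===== CLAIM (what is proved, stated in full; the proofs are below) =====
def Claim_equal_synonym_queries : Prop := ∀ (synonym_words : List (String × String)) (queries : List (String × String)), Dom_synonym_queries synonym_words queries → Spec_synonym_queries synonym_words queries (synonym_queries synonym_words queries)

-- ===== LEMMAS AND PROOFS =====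

-- ---------- generic dict bridges ----------

lemma pvMemKeys {ν : Type} {d : PySem.Dict String ν} {k : String} {v : ν}
    (h : d.get? k = some v) : k ∈ d.keys := by
  by_contra hk
  rw [(PySem.Dict.get?_eq_none_iff_not_mem_keys _ _).mpr hk] at h
  simp at h

lemma pvG_none {comp : PySem.Dict String String} {u : String}
    (h : comp.get? u = none) : pvCompGet comp u = u := by
  simp [pvCompGet, PySem.Dict.getD_eq_get?_getD, h]

lemma pvG_some {comp : PySem.Dict String String} {u r : String}
    (h : comp.get? u = some r) : pvCompGet comp u = r := by
  simp [pvCompGet, PySem.Dict.getD_eq_get?_getD, h]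

lemma pvCompGetD {comp : PySem.Dict String String} {w : String}
    (hw : w ∈ comp.keys) (d : String) : comp.getD w d = pvCompGet comp w := by
  cases h : comp.get? w with
  | none => exact absurd hw ((PySem.Dict.get?_eq_none_iff_not_mem_keys _ _).mp h)
  | some v => simp [pvCompGet, PySem.Dict.getD_eq_get?_getD, h]

lemma pvFindFilterNe {α : Type} (k k' : String) (h : k' ≠ k) :
    ∀ l : List (String × α),
      List.find? (fun p => p.1 == k') (List.filter (fun p => !(p.1 == k)) l)
        = List.find? (fun p => p.1 == k') l := by
  intro l
  induction l with
  | nil => rfl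
  | cons a t ih =>
    by_cases hak : a.1 = k
    · have h1 : (a.1 == k) = true := by simp [hak]
      have h2 : (a.1 == k') = false := by simp [hak]; exact fun hh => (h hh.symm).elim
      simp [h1, List.find?, h2, ih]
    · have h1 : (a.1 == k) = false := by simp [hak]
      by_cases hak' : a.1 = k'
      · simp [List.find?, hak', h]
      · have h2 : (a.1 == k') = false := by simp [hak']
        simp [h1, List.find?, h2, ih]

lemma pvGet?EraseNe {α : Type} (d : PySem.Dict String α) (k k' : String) (h : k' ≠ k) :
    (d.erase k).get? k' = d.get? k' := by
  show Option.map _ _ = Option.map _ _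
  rw [show (d.erase k).items = List.filter (fun p => !(p.1 == k)) d.items from rfl,
    pvFindFilterNe k k' h]

lemma pvGetDEraseNe {α : Type} (d : PySem.Dict String α) (k k' : String) (dflt : α) (h : k' ≠ k) :
    (d.erase k).getD k' dflt = d.getD k' dflt := by
  rw [PySem.Dict.getD_eq_get?_getD, PySem.Dict.getD_eq_get?_getD, pvGet?EraseNe d k k' h]

lemma pvCountPLt {α : Type} {l : List α} {p q : α → Bool} {x : α} (hx : x ∈ l)
    (himp : ∀ a, p a = true → q a = true) (hpx : p x = false) (hqx : q x = true) :
    l.countP p < l.countP q := by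
  obtain ⟨s, t, rfl⟩ := List.append_of_mem hx
  have h1 := List.countP_mono_left (l := s) (p := p) (q := q) (fun a _ => himp a)
  have h2 := List.countP_mono_left (l := t) (p := p) (q := q) (fun a _ => himp a)
  simp [List.countP_append, hpx, hqx]
  omega

lemma pvKeysLen {α : Type} (d : PySem.Dict String α) : d.keys.length = d.size := by
  simp [PySem.Dict.keys, PySem.Dict.size]

-- ---------- A-side: the root function of the parents forest ----------

def pvRoot (P : PySem.Dict String String) (w : String) : String :=
  (pvRootF P (P.size + 1) w).2

def GoodA (P : PySem.Dict String String) : Prop :=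
  (∀ k v, P.get? k = some v → v ∈ P.keys) ∧
  ∃ rank : String → Nat, ∀ k v, P.get? k = some v → v ≠ k → rank v < rank k

def pvCnt (P : PySem.Dict String String) (rank : String → Nat) (w : String) : Nat :=
  P.keys.countP (fun k => decide (rank k < rank w))

lemma pvCntStep {P : PySem.Dict String String} {rank : String → Nat}
    (hcl : ∀ k v, P.get? k = some v → v ∈ P.keys)
    (hrk : ∀ k v, P.get? k = some v → v ≠ k → rank v < rank k)
    {w p : String} (h : P.get? w = some p) (hne : p ≠ w) :
    pvCnt P rank p < pvCnt P rank w := by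
  have hpw : rank p < rank w := hrk _ _ h hne
  exact pvCountPLt (hcl _ _ h)
    (fun a ha => by simp only [decide_eq_true_eq] at *; omega)
    (by simp) (by simp [hpw])

lemma pvCnt_le_size (P : PySem.Dict String String) (rank : String → Nat) (w : String) :
    pvCnt P rank w ≤ P.size := by
  calc pvCnt P rank w ≤ P.keys.length := List.countP_le_length
  _ = P.size := pvKeysLen P

lemma pvRootF_stable (P : PySem.Dict String String) (rank : String → Nat)
    (hcl : ∀ k v, P.get? k = some v → v ∈ P.keys)
    (hrk : ∀ k v, P.get? k = some v → v ≠ k → rank v < rank k) :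
    ∀ (c : Nat) (w : String), pvCnt P rank w ≤ c →
      ∀ n m, pvCnt P rank w < n → pvCnt P rank w < m → pvRootF P n w = pvRootF P m w := by
  intro c
  induction c with
  | zero =>
    intro w hw n m hn hm
    obtain ⟨n', rfl⟩ : ∃ n', n = n' + 1 := ⟨n - 1, by omega⟩
    obtain ⟨m', rfl⟩ : ∃ m', m = m' + 1 := ⟨m - 1, by omega⟩
    cases h : P.get? w with
    | none => simp [pvRootF, h]
    | some p =>
      by_cases hpw : p = w
      · simp [pvRootF, h, hpw]
      · exact absurd (pvCntStep hcl hrk h hpw) (by omega)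
  | succ c ih =>
    intro w hw n m hn hm
    obtain ⟨n', rfl⟩ : ∃ n', n = n' + 1 := ⟨n - 1, by omega⟩
    obtain ⟨m', rfl⟩ : ∃ m', m = m' + 1 := ⟨m - 1, by omega⟩
    cases h : P.get? w with
    | none => simp [pvRootF, h]
    | some p =>
      by_cases hpw : p = w
      · simp [pvRootF, h, hpw]
      · have hlt := pvCntStep hcl hrk h hpw
        have := ih p (by omega) n' m' (by omega) (by omega)
        simp [pvRootF, h, hpw, this]

lemma pvRoot_of_none {P : PySem.Dict String String} {w : String}
    (h : P.get? w = none) : pvRoot P w = w := by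
  simp [pvRoot, pvRootF, h]

lemma pvRoot_of_self {P : PySem.Dict String String} {w : String}
    (h : P.get? w = some w) : pvRoot P w = w := by
  simp [pvRoot, pvRootF, h]

lemma pvRoot_step {P : PySem.Dict String String} (hG : GoodA P) {w p : String}
    (h : P.get? w = some p) (hne : p ≠ w) : pvRoot P w = pvRoot P p := by
  obtain ⟨hcl, rank, hrk⟩ := hG
  have hlt := pvCntStep hcl hrk h hne
  have hc := pvCnt_le_size P rank w
  have hstable := pvRootF_stable P rank hcl hrk (pvCnt P rank p) p le_rfl
    P.size (P.size + 1) (by omega) (by omega)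
  show (pvRootF P (P.size + 1) w).2 = (pvRootF P (P.size + 1) p).2
  rw [show pvRootF P (P.size + 1) w = (w :: (pvRootF P P.size p).1, (pvRootF P P.size p).2) from
    by simp [pvRootF, h, hne], hstable]

lemma pvRoot_ind {P : PySem.Dict String String} (hG : GoodA P) (Q : String → Prop)
    (h0 : ∀ w, P.get? w = none → Q w) (h1 : ∀ w, P.get? w = some w → Q w)
    (h2 : ∀ w p, P.get? w = some p → p ≠ w → Q p → Q w) : ∀ w, Q w := by
  obtain ⟨hcl, rank, hrk⟩ := hG
  suffices h : ∀ c w, pvCnt P rank w ≤ c → Q w from fun w => h _ w le_rfl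
  intro c
  induction c with
  | zero =>
    intro w hw
    cases h : P.get? w with
    | none => exact h0 w h
    | some p =>
      by_cases hpw : p = w
      · exact h1 w (hpw ▸ h)
      · exact absurd (pvCntStep hcl hrk h hpw) (by omega)
  | succ c ih =>
    intro w hw
    cases h : P.get? w with
    | none => exact h0 w h
    | some p =>
      by_cases hpw : p = w
      · exact h1 w (hpw ▸ h)
      · exact h2 w p h hpw (ih p (by have := pvCntStep hcl hrk h hpw; omega))

lemma pvRoot_mem {P : PySem.Dict String String} (hG : GoodA P) :
    ∀ w, w ∈ P.keys → pvRoot P w ∈ P.keys := by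
  refine pvRoot_ind hG (fun w => w ∈ P.keys → pvRoot P w ∈ P.keys) ?_ ?_ ?_
  · intro w h hw
    exact absurd hw ((PySem.Dict.get?_eq_none_iff_not_mem_keys _ _).mp h)
  · intro w h hw
    rw [pvRoot_of_self h]; exact hw
  · intro w p h hne ih _
    rw [pvRoot_step hG h hne]
    exact ih (hG.1 _ _ h)

lemma pvRoot_isRoot {P : PySem.Dict String String} (hG : GoodA P) :
    ∀ w, P.get? (pvRoot P w) = some (pvRoot P w) ∨ P.get? (pvRoot P w) = none := by
  refine pvRoot_ind hG (fun w => P.get? (pvRoot P w) = some (pvRoot P w) ∨ P.get? (pvRoot P w) = none) ?_ ?_ ?_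
  · intro w h; rw [pvRoot_of_none h]; right; exact h
  · intro w h; rw [pvRoot_of_self h]; left; exact h
  · intro w p h hne ih; rw [pvRoot_step hG h hne]; exact ih

lemma pvRoot_root {P : PySem.Dict String String} (hG : GoodA P) (w : String) :
    pvRoot P (pvRoot P w) = pvRoot P w := by
  rcases pvRoot_isRoot hG w with h | h
  · exact pvRoot_of_self h
  · exact pvRoot_of_none h

lemma pvRoot_key_isSelf {P : PySem.Dict String String} (hG : GoodA P) {w : String}
    (hw : w ∈ P.keys) : P.get? (pvRoot P w) = some (pvRoot P w) := by
  rcases pvRoot_isRoot hG w with h | h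
  · exact h
  · exact absurd (pvRoot_mem hG w hw) ((PySem.Dict.get?_eq_none_iff_not_mem_keys _ _).mp h)

lemma pvRoot_ne {P : PySem.Dict String String} (hG : GoodA P) {w p : String}
    (h : P.get? w = some p) (hne : p ≠ w) : pvRoot P w ≠ w := by
  obtain ⟨hcl, rank, hrk⟩ := hG
  have hG' : GoodA P := ⟨hcl, rank, hrk⟩
  have hle : ∀ u, rank (pvRoot P u) ≤ rank u := by
    refine pvRoot_ind hG' (fun u => rank (pvRoot P u) ≤ rank u) ?_ ?_ ?_
    · intro u hu; rw [pvRoot_of_none hu]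
    · intro u hu; rw [pvRoot_of_self hu]
    · intro u q hu hq ih
      rw [pvRoot_step hG' hu hq]
      exact le_trans ih (le_of_lt (hrk _ _ hu hq))
  have h1 := hle p
  rw [← pvRoot_step hG' h hne] at h1
  have h2 := hrk _ _ h hne
  intro hcontra
  rw [hcontra] at h1
  omega


-- ---------- A-side: effect of the dict operations on pvRoot ----------

lemma pvRootF_congr {P' P : PySem.Dict String String}
    (hq : ∀ u, P'.get? u = P.get? u) : ∀ n w, pvRootF P' n w = pvRootF P n w := by
  intro n
  induction n with
  | zero => intro w; rfl
  | succ n ih =>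
    intro w
    cases h : P.get? w with
    | none => simp [pvRootF, hq w, h]
    | some p =>
      by_cases hpw : p = w
      · simp [pvRootF, hq w, h, hpw]
      · simp [pvRootF, hq w, h, hpw, ih p]

lemma pvRoot_congr {P' P : PySem.Dict String String}
    (hq : ∀ u, P'.get? u = P.get? u) (hs : P'.size = P.size) :
    ∀ w, pvRoot P' w = pvRoot P w := by
  intro w
  unfold pvRoot
  rw [hs, pvRootF_congr hq]

lemma pvGoodA_congr {P' P : PySem.Dict String String}
    (hq : ∀ u, P'.get? u = P.get? u) (hk : P'.keys = P.keys) (hG : GoodA P) : GoodA P' := by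
  obtain ⟨hcl, rank, hrk⟩ := hG
  refine ⟨fun k v h => ?_, rank, fun k v h => hrk k v (by rw [← hq k]; exact h)⟩
  rw [hk]; exact hcl k v (by rw [← hq k]; exact h)

lemma pvContains_of_mem {ν : Type} {d : PySem.Dict String ν} {k : String}
    (h : k ∈ d.keys) : d.contains k = true :=
  (PySem.Dict.contains_iff_mem_keys d k).mpr h

lemma pvFreshInsert {P : PySem.Dict String String} (hG : GoodA P) {w : String}
    (hw : w ∉ P.keys) :
    GoodA (P.insert w w) ∧ (∀ u, pvRoot (P.insert w w) u = pvRoot P u) := by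
  have hkeys : (P.insert w w).keys = P.keys ++ [w] :=
    PySem.Dict.keys_insert_of_not_contains P w (by
      cases hc : P.contains w with
      | false => rfl
      | true => exact absurd ((PySem.Dict.contains_iff_mem_keys P w).mp hc) hw)
  have hG' : GoodA (P.insert w w) := by
    obtain ⟨hcl, rank, hrk⟩ := hG
    refine ⟨fun k v h => ?_, rank, fun k v h hne => ?_⟩
    · rw [PySem.Dict.get?_insert] at h
      rw [hkeys]
      split at h
      · cases h; simp
      · exact List.mem_append_left _ (hcl _ _ h)
    · rw [PySem.Dict.get?_insert] at h
      split at h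
      · rename_i hkw
        cases h; exact absurd hkw.symm hne
      · exact hrk _ _ h hne
  refine ⟨hG', ?_⟩
  refine pvRoot_ind hG (fun u => pvRoot (P.insert w w) u = pvRoot P u) ?_ ?_ ?_
  · intro u hu
    by_cases huw : u = w
    · subst huw
      rw [pvRoot_of_none hu, pvRoot_of_self (by rw [PySem.Dict.get?_insert]; simp)]
    · rw [pvRoot_of_none hu, pvRoot_of_none (by rw [PySem.Dict.get?_insert, if_neg huw]; exact hu)]
  · intro u hu
    have huw : u ≠ w := fun he => hw (he ▸ pvMemKeys hu)
    rw [pvRoot_of_self hu, pvRoot_of_self (by rw [PySem.Dict.get?_insert, if_neg huw]; exact hu)]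
  · intro u p hu hpu ih
    have huw : u ≠ w := fun he => hw (he ▸ pvMemKeys hu)
    rw [pvRoot_step hG hu hpu, ← ih,
      pvRoot_step hG' (by rw [PySem.Dict.get?_insert, if_neg huw]; exact hu) hpu]

lemma pvLinkInsert {P : PySem.Dict String String} (hG : GoodA P) {x r : String}
    (hx : x ∈ P.keys) (hr : P.get? r = some r) (hxr : x ≠ r)
    (hcase : P.get? x = some x ∨ pvRoot P x = r) :
    GoodA (P.insert x r) ∧
    (∀ u, pvRoot (P.insert x r) u = if pvRoot P u = x then r else pvRoot P u) ∧
    (P.insert x r).keys = P.keys ∧ (P.insert x r).size = P.size := by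
  have hkeys : (P.insert x r).keys = P.keys := PySem.Dict.keys_insert_of_contains P r (pvContains_of_mem hx)
  have hsize : (P.insert x r).size = P.size := by
    rw [PySem.Dict.size_insert, if_pos (pvContains_of_mem hx)]
  have hG' : GoodA (P.insert x r) := by
    obtain ⟨hcl, rank, hrk⟩ := hG
    refine ⟨fun k v h => ?_, fun u => if u = r then 0 else rank u + 1, fun k v h hne => ?_⟩
    · rw [PySem.Dict.get?_insert] at h
      rw [hkeys]
      split at h
      · cases h; exact pvMemKeys hr
      · exact hcl _ _ h
    · rw [PySem.Dict.get?_insert] at h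
      split at h
      · rename_i hkx
        cases h; subst hkx
        show (if r = r then 0 else rank r + 1) < (if k = r then 0 else rank k + 1)
        rw [if_pos rfl, if_neg hxr]
        omega
      · rename_i hkx
        have hkr : k ≠ r := by
          intro he; subst he
          rw [hr] at h; cases h; exact hne rfl
        show (if v = r then 0 else rank v + 1) < (if k = r then 0 else rank k + 1)
        rw [if_neg hkr]
        by_cases hvr : v = r
        · rw [if_pos hvr]; omega
        · rw [if_neg hvr]
          have := hrk _ _ h hne
          omega
  have hr' : (P.insert x r).get? r = some r := by
    rw [PySem.Dict.get?_insert, if_neg (Ne.symm hxr)]; exact hr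
  refine ⟨hG', ?_, hkeys, hsize⟩
  refine pvRoot_ind hG (fun u => pvRoot (P.insert x r) u = if pvRoot P u = x then r else pvRoot P u) ?_ ?_ ?_
  · intro u hu
    have hux : u ≠ x := by
      intro he; subst he
      exact absurd hx ((PySem.Dict.get?_eq_none_iff_not_mem_keys _ _).mp hu)
    rw [pvRoot_of_none hu, if_neg hux,
      pvRoot_of_none (by rw [PySem.Dict.get?_insert, if_neg hux]; exact hu)]
  · intro u hu
    by_cases hux : u = x
    · subst hux
      rw [pvRoot_of_self hu, if_pos rfl,
        pvRoot_step hG' (by rw [PySem.Dict.get?_insert, if_pos rfl]) (Ne.symm hxr),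
        pvRoot_of_self hr']
    · rw [pvRoot_of_self hu, if_neg hux,
        pvRoot_of_self (by rw [PySem.Dict.get?_insert, if_neg hux]; exact hu)]
  · intro u p hu hpu ih
    by_cases hux : u = x
    · subst hux
      have hroot : pvRoot P u = r := by
        rcases hcase with hc | hc
        · rw [hu] at hc; cases hc; exact absurd rfl hpu
        · exact hc
      rw [pvRoot_step hG' (by rw [PySem.Dict.get?_insert, if_pos rfl]) (Ne.symm hxr),
        pvRoot_of_self hr', hroot, if_neg (Ne.symm hxr)]
    · rw [pvRoot_step hG hu hpu,
        pvRoot_step hG' (by rw [PySem.Dict.get?_insert, if_neg hux]; exact hu) hpu, ih]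

lemma pvCompressInsert {P : PySem.Dict String String} (hG : GoodA P) {x r : String}
    (hx : x ∈ P.keys) (hr : pvRoot P x = r) (hxr : x ≠ r) :
    GoodA (P.insert x r) ∧ (∀ u, pvRoot (P.insert x r) u = pvRoot P u) ∧
    (P.insert x r).keys = P.keys ∧ (P.insert x r).size = P.size := by
  have hrself : P.get? r = some r := hr ▸ pvRoot_key_isSelf hG hx
  obtain ⟨hG', hform, hkeys, hsize⟩ := pvLinkInsert hG hx hrself hxr (Or.inr hr)
  refine ⟨hG', fun u => ?_, hkeys, hsize⟩
  rw [hform u, if_neg ?_]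
  intro he
  have := pvRoot_root hG u
  rw [he] at this
  rw [this] at hr
  exact hxr (hr ▸ rfl)

lemma pvTravSpec {P : PySem.Dict String String} (hG : GoodA P) :
    ∀ n w t, t ∈ (pvRootF P n w).1 →
      t ∈ P.keys ∧ pvRoot P t = pvRoot P w ∧ pvRoot P t ≠ t := by
  intro n
  induction n with
  | zero => intro w t ht; simp [pvRootF] at ht
  | succ n ih =>
    intro w t ht
    cases h : P.get? w with
    | none => simp [pvRootF, h] at ht
    | some p =>
      by_cases hpw : p = w
      · simp [pvRootF, h, hpw] at ht
      · simp only [pvRootF, h, if_neg hpw] at ht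
        rcases List.mem_cons.mp ht with rfl | ht
        · exact ⟨pvMemKeys h, rfl, pvRoot_ne hG h hpw⟩
        · obtain ⟨h1, h2, h3⟩ := ih p t ht
          exact ⟨h1, h2.trans (pvRoot_step hG h hpw).symm, h3⟩

lemma pvFoldCompress {P : PySem.Dict String String} (_hG : GoodA P) (r : String) :
    ∀ (ts : List String), (∀ t ∈ ts, t ∈ P.keys ∧ pvRoot P t = r ∧ pvRoot P t ≠ t) →
    ∀ Q, GoodA Q → (∀ u, pvRoot Q u = pvRoot P u) → Q.keys = P.keys → Q.size = P.size →
      GoodA (ts.foldl (fun Q word => Q.insert word r) Q) ∧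
      (∀ u, pvRoot (ts.foldl (fun Q word => Q.insert word r) Q) u = pvRoot P u) ∧
      (ts.foldl (fun Q word => Q.insert word r) Q).keys = P.keys ∧
      (ts.foldl (fun Q word => Q.insert word r) Q).size = P.size := by
  intro ts
  induction ts with
  | nil => intro _ Q hGQ hRQ hkQ hsQ; exact ⟨hGQ, hRQ, hkQ, hsQ⟩
  | cons t ts ih =>
    intro hts Q hGQ hRQ hkQ hsQ
    obtain ⟨ht1, ht2, ht3⟩ := hts t (List.mem_cons_self ..)
    have htr : t ≠ r := by
      intro he; rw [← he] at ht2; exact ht3 ht2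
    obtain ⟨hG1, hR1, hk1, hs1⟩ := pvCompressInsert hGQ (hkQ ▸ ht1) ((hRQ t).trans ht2) htr
    exact ih (fun t' ht' => hts t' (List.mem_cons_of_mem _ ht'))
      (Q.insert t r) hG1 (fun u => (hR1 u).trans (hRQ u)) (hk1.trans hkQ) (hs1.trans hsQ)

lemma pvGetRoot_spec {P : PySem.Dict String String} (hG : GoodA P) (w : String) :
    (pvGetRoot P w).2 = pvRoot P w ∧ GoodA (pvGetRoot P w).1 ∧
    (∀ u, pvRoot (pvGetRoot P w).1 u = pvRoot P u) ∧
    (pvGetRoot P w).1.keys = P.keys ∧ (pvGetRoot P w).1.size = P.size := by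
  refine ⟨rfl, ?_⟩
  have htr : ∀ t ∈ (pvRootF P (P.size + 1) w).1,
      t ∈ P.keys ∧ pvRoot P t = pvRoot P w ∧ pvRoot P t ≠ t :=
    fun t ht => pvTravSpec hG (P.size + 1) w t ht
  have := pvFoldCompress hG (pvRoot P w) (pvRootF P (P.size + 1) w).1 htr
    P hG (fun _ => rfl) rfl rfl
  exact this

lemma pvAreSyn_spec {P : PySem.Dict String String} (hG : GoodA P) (w1 w2 : String) :
    (pvAreSynonymous P w1 w2).2 = (pvRoot P w1 == pvRoot P w2) ∧
    GoodA (pvAreSynonymous P w1 w2).1 ∧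
    (∀ u, pvRoot (pvAreSynonymous P w1 w2).1 u = pvRoot P u) := by
  obtain ⟨hv1, hG1, hR1, _, _⟩ := pvGetRoot_spec hG w1
  obtain ⟨hv2, hG2, hR2, _, _⟩ := pvGetRoot_spec hG1 w2
  refine ⟨?_, hG2, fun u => (hR2 u).trans (hR1 u)⟩
  show ((pvGetRoot P w1).2 == (pvGetRoot (pvGetRoot P w1).1 w2).2) = _
  rw [hv1, hv2, hR1 w2]


-- ---------- the merged-partition relation ----------

def pvMerged (f : String → String) (w1 w2 u v : String) : Prop :=
  f u = f v ∨ (f u = f w1 ∧ f v = f w2) ∨ (f u = f w2 ∧ f v = f w1)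

lemma pvMergedIffEq {f : String → String} {w1 w2 : String} (hf : f w1 = f w2) (u v : String) :
    pvMerged f w1 w2 u v ↔ f u = f v := by
  unfold pvMerged
  constructor
  · rintro (h | ⟨h1, h2⟩ | ⟨h1, h2⟩)
    · exact h
    · rw [h1, h2, hf]
    · rw [h1, h2, hf]
  · exact fun h => Or.inl h

lemma pvCollapseIff (f : String → String) (r1 r2 a b : String)
    (hab : (a = r1 ∧ b = r2) ∨ (a = r2 ∧ b = r1)) (hne : a ≠ b) (u v : String) :
    ((if f u = b then a else f u) = (if f v = b then a else f v)) ↔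
      (f u = f v ∨ (f u = r1 ∧ f v = r2) ∨ (f u = r2 ∧ f v = r1)) := by
  have hba : b ≠ a := Ne.symm hne
  rcases hab with ⟨ha, hb'⟩ | ⟨ha, hb'⟩ <;> subst ha <;> subst hb' <;>
    by_cases h1 : f u = b <;> by_cases h2 : f v = b <;>
      simp [h1, h2, hba, eq_comm] <;> tauto

-- ---------- B-side: invariant of comp/members ----------

def GoodB (comp : PySem.Dict String String) (members : PySem.Dict String (List String)) : Prop :=
  (∀ w r, comp.get? w = some r → comp.get? r = some r ∧ w ∈ members.getD r []) ∧
  (∀ r, comp.get? r = some r → ∀ w, w ∈ members.getD r [] → comp.get? w = some r)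

lemma pvNotMemKeys {ν : Type} {d : PySem.Dict String ν} {w : String}
    (hc : d.contains w = false) : w ∉ d.keys := by
  intro h
  rw [pvContains_of_mem h] at hc
  cases hc

lemma pvGet?EraseSelf {α : Type} (d : PySem.Dict String α) (k : String) :
    (d.erase k).get? k = none := by
  show Option.map _ _ = _
  rw [show (d.erase k).items = List.filter (fun p => !(p.1 == k)) d.items from rfl]
  rw [List.find?_eq_none.mpr]
  · rfl
  · intro p hp
    have := (List.mem_filter.mp hp).2
    simp at this ⊢
    exact this

lemma pvGetDEraseSelf {α : Type} (d : PySem.Dict String α) (k : String) (dflt : α) :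
    (d.erase k).getD k dflt = dflt := by
  rw [PySem.Dict.getD_eq_get?_getD, pvGet?EraseSelf]
  rfl

lemma pvFoldInsertConst (r1 : String) :
    ∀ (ts : List String) (c : PySem.Dict String String) (u : String),
      (ts.foldl (fun c w => c.insert w r1) c).get? u = if u ∈ ts then some r1 else c.get? u := by
  intro ts
  induction ts with
  | nil => intro c u; simp
  | cons t ts ih =>
    intro c u
    show (ts.foldl (fun c w => c.insert w r1) (c.insert t r1)).get? u = _
    rw [ih, PySem.Dict.get?_insert]
    by_cases hts : u ∈ ts
    · simp [hts]
    · by_cases htu : u = t <;> simp [hts, htu]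

lemma pvCompAdd_spec {s : PySem.Dict String String × PySem.Dict String (List String)}
    (hB : GoodB s.1 s.2) (w : String) :
    GoodB (pvCompAdd s w).1 (pvCompAdd s w).2 ∧
    (∀ u, pvCompGet (pvCompAdd s w).1 u = pvCompGet s.1 u) ∧
    w ∈ (pvCompAdd s w).1.keys ∧
    (∀ u, u ∈ s.1.keys → u ∈ (pvCompAdd s w).1.keys) := by
  cases hc : s.1.contains w with
  | true =>
    have he : pvCompAdd s w = s := by simp [pvCompAdd, hc]
    rw [he]
    exact ⟨hB, fun _ => rfl, (PySem.Dict.contains_iff_mem_keys _ _).mp hc, fun _ h => h⟩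
  | false =>
    have hw : w ∉ s.1.keys := pvNotMemKeys hc
    have hwn : s.1.get? w = none := (PySem.Dict.get?_eq_none_iff_not_mem_keys _ _).mpr hw
    simp only [pvCompAdd, hc, Bool.false_eq_true, if_false]
    have hkeys : (s.1.insert w w).keys = s.1.keys ++ [w] :=
      PySem.Dict.keys_insert_of_not_contains _ _ hc
    refine ⟨⟨?_, ?_⟩, ?_, ?_, ?_⟩
    · intro u r h
      rw [PySem.Dict.get?_insert] at h
      split at h
      · rename_i huw
        cases h
        constructor
        · rw [PySem.Dict.get?_insert, if_pos rfl]
        · rw [PySem.Dict.getD_insert, if_pos rfl]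
          exact List.mem_singleton.mpr huw
      · rename_i huw
        obtain ⟨hlive, hmem⟩ := hB.1 u r h
        have hrw : r ≠ w := fun he => hw (he ▸ pvMemKeys hlive)
        constructor
        · rw [PySem.Dict.get?_insert, if_neg hrw]; exact hlive
        · rw [PySem.Dict.getD_insert, if_neg hrw]; exact hmem
    · intro r hr u hu
      rw [PySem.Dict.get?_insert] at hr
      split at hr
      · rename_i hrw
        cases hr
        rw [PySem.Dict.getD_insert, if_pos rfl] at hu
        cases List.mem_singleton.mp hu
        rw [PySem.Dict.get?_insert, if_pos rfl]
      · rename_i hrw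
        rw [PySem.Dict.getD_insert, if_neg hrw] at hu
        have := hB.2 r hr u hu
        have huw : u ≠ w := fun he => hw (he ▸ pvMemKeys this)
        rw [PySem.Dict.get?_insert, if_neg huw]
        exact this
    · intro u
      by_cases huw : u = w
      · subst huw
        rw [pvG_none hwn, pvG_some (by rw [PySem.Dict.get?_insert, if_pos rfl])]
      · show (s.1.insert w w).getD u u = s.1.getD u u
        rw [PySem.Dict.getD_insert, if_neg huw]
    · rw [hkeys]; exact List.mem_append_right _ (List.mem_singleton.mpr rfl)
    · intro u hu; rw [hkeys]; exact List.mem_append_left _ hu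

lemma pvRelabel_spec {C : PySem.Dict String String} {M : PySem.Dict String (List String)}
    (hB : GoodB C M) {a b : String}
    (ha : C.get? a = some a) (hb : C.get? b = some b) (hne : a ≠ b) :
    GoodB ((M.getD b []).foldl (fun c w => c.insert w a) C)
      ((M.erase b).insert a ((M.erase b).getD a [] ++ M.getD b [])) ∧
    (∀ u, pvCompGet ((M.getD b []).foldl (fun c w => c.insert w a) C) u
        = if pvCompGet C u = b then a else pvCompGet C u) := by
  have hba : b ≠ a := Ne.symm hne
  have hmem : ∀ u, u ∈ M.getD b [] ↔ C.get? u = some b :=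
    fun u => ⟨hB.2 b hb u, fun h => (hB.1 u b h).2⟩
  have hC' : ∀ u, ((M.getD b []).foldl (fun c w => c.insert w a) C).get? u
      = if C.get? u = some b then some a else C.get? u := by
    intro u
    rw [pvFoldInsertConst]
    by_cases hu : u ∈ M.getD b []
    · rw [if_pos hu, if_pos ((hmem u).mp hu)]
    · rw [if_neg hu, if_neg (fun h => hu ((hmem u).mpr h))]
  have hM' : ∀ r, ((M.erase b).insert a ((M.erase b).getD a [] ++ M.getD b [])).getD r []
      = if r = a then M.getD a [] ++ M.getD b [] else if r = b then [] else M.getD r [] := by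
    intro r
    rw [PySem.Dict.getD_insert]
    by_cases hra : r = a
    · rw [if_pos hra, if_pos hra, pvGetDEraseNe _ _ _ _ hne]
    · rw [if_neg hra, if_neg hra]
      by_cases hrb : r = b
      · subst hrb
        rw [if_pos rfl, pvGetDEraseSelf]
      · rw [if_neg hrb, pvGetDEraseNe _ _ _ _ hrb]
  have hlivea : ((M.getD b []).foldl (fun c w => c.insert w a) C).get? a = some a := by
    rw [hC' a, if_neg (by rw [ha]; exact fun h => hne (Option.some.inj h))]
    exact ha
  constructor
  · constructor
    · intro u r h
      rw [hC' u] at h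
      by_cases hcu : C.get? u = some b
      · rw [if_pos hcu] at h
        cases h
        refine ⟨hlivea, ?_⟩
        rw [hM' a, if_pos rfl]
        exact List.mem_append_right _ ((hmem u).mpr hcu)
      · rw [if_neg hcu] at h
        by_cases hraa : r = a
        · rw [hraa]
          refine ⟨hlivea, ?_⟩
          rw [hM' a, if_pos rfl]
          exact List.mem_append_left _ (hB.1 u a (hraa ▸ h)).2
        · have hrb : r ≠ b := fun he => hcu (he ▸ h)
          obtain ⟨hlive, hmemu⟩ := hB.1 u r h
          constructor
          · rw [hC' r, if_neg (by rw [hlive]; exact fun hh => hrb (Option.some.inj hh))]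
            exact hlive
          · rw [hM' r, if_neg hraa, if_neg hrb]
            exact hmemu
    · intro r hr u hu
      by_cases hra : r = a
      · rw [hra] at hu ⊢
        rw [hM' a, if_pos rfl] at hu
        rcases List.mem_append.mp hu with hu | hu
        · have hcu := hB.2 a ha u hu
          rw [hC' u, if_neg (by rw [hcu]; exact fun hh => hne (Option.some.inj hh))]
          exact hcu
        · rw [hC' u, if_pos ((hmem u).mp hu)]
      · have hrb : r ≠ b := by
          intro he; rw [he] at hr
          rw [hC' b, if_pos hb] at hr
          exact hne (Option.some.inj hr)
        rw [hC' r] at hr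
        have hcr : C.get? r = some r := by
          by_cases hcb : C.get? r = some b
          · rw [if_pos hcb] at hr
            exact absurd (Option.some.inj hr).symm hra
          · rw [if_neg hcb] at hr
            exact hr
        rw [hM' r, if_neg hra, if_neg hrb] at hu
        have hcu := hB.2 r hcr u hu
        rw [hC' u, if_neg (by rw [hcu]; exact fun hh => hrb (Option.some.inj hh))]
        exact hcu
  · intro u
    cases h : C.get? u with
    | none =>
      have hub : u ≠ b := fun he => by rw [he, hb] at h; cases h
      rw [pvG_none h, pvG_none (by rw [hC' u, h, if_neg (by intro hh; cases hh)]), if_neg hub]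
    | some r =>
      by_cases hrb : r = b
      · subst hrb
        rw [pvG_some h, if_pos rfl, pvG_some (by rw [hC' u, if_pos h])]
      · rw [pvG_some h, if_neg hrb,
          pvG_some (by rw [hC' u, if_neg (fun hh => hrb (Option.some.inj (h ▸ hh)))]; exact h)]

lemma pvMergeStep_spec {comp : PySem.Dict String String} {members : PySem.Dict String (List String)}
    (hB : GoodB comp members) (w1 w2 : String) :
    GoodB (pvMergeStep (comp, members) w1 w2).1 (pvMergeStep (comp, members) w1 w2).2 ∧
    ∀ u v, (pvCompGet (pvMergeStep (comp, members) w1 w2).1 u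
              = pvCompGet (pvMergeStep (comp, members) w1 w2).1 v
            ↔ pvMerged (pvCompGet comp) w1 w2 u v) := by
  obtain ⟨hB1, hg1, hw1a, hmono1⟩ := pvCompAdd_spec (s := (comp, members)) hB w1
  obtain ⟨hB2, hg2', hw2, hmono2⟩ := pvCompAdd_spec hB1 w2
  set s2 := pvCompAdd (pvCompAdd (comp, members) w1) w2 with hs2
  have hg2 : ∀ u, pvCompGet s2.1 u = pvCompGet comp u := fun u => (hg2' u).trans (hg1 u)
  have hw1 : w1 ∈ s2.1.keys := hmono2 _ hw1a
  have hr1 : s2.1.getD w1 "" = pvCompGet comp w1 := by rw [pvCompGetD hw1, hg2]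
  have hr2 : s2.1.getD w2 "" = pvCompGet comp w2 := by rw [pvCompGetD hw2, hg2]
  have hlive : ∀ w, w ∈ s2.1.keys → s2.1.get? (pvCompGet s2.1 w) = some (pvCompGet s2.1 w) := by
    intro w hw
    cases h : s2.1.get? w with
    | none => exact absurd hw ((PySem.Dict.get?_eq_none_iff_not_mem_keys _ _).mp h)
    | some r => rw [pvG_some h]; exact (hB2.1 w r h).1
  simp only [pvMergeStep, ← hs2]
  by_cases hne : s2.1.getD w1 "" ≠ s2.1.getD w2 ""
  · rw [if_pos hne]
    set rr := (if (s2.2.getD (s2.1.getD w1 "") []).length < (s2.2.getD (s2.1.getD w2 "") []).length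
      then (s2.1.getD w2 "", s2.1.getD w1 "") else (s2.1.getD w1 "", s2.1.getD w2 "")) with hrrdef
    have hab : (rr.1 = s2.1.getD w1 "" ∧ rr.2 = s2.1.getD w2 "") ∨
        (rr.1 = s2.1.getD w2 "" ∧ rr.2 = s2.1.getD w1 "") := by
      rw [hrrdef]
      by_cases hc : (s2.2.getD (s2.1.getD w1 "") []).length < (s2.2.getD (s2.1.getD w2 "") []).length
      · right; rw [if_pos hc]; exact ⟨rfl, rfl⟩
      · left; rw [if_neg hc]; exact ⟨rfl, rfl⟩
    have hanb : rr.1 ≠ rr.2 := by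
      rcases hab with ⟨ha', hb'⟩ | ⟨ha', hb'⟩
      · rw [ha', hb']; exact hne
      · rw [ha', hb']; exact Ne.symm hne
    have hga : s2.1.get? rr.1 = some rr.1 := by
      rcases hab with ⟨ha', _⟩ | ⟨ha', _⟩
      · rw [ha', pvCompGetD hw1]; exact hlive w1 hw1
      · rw [ha', pvCompGetD hw2]; exact hlive w2 hw2
    have hgb : s2.1.get? rr.2 = some rr.2 := by
      rcases hab with ⟨_, hb'⟩ | ⟨_, hb'⟩
      · rw [hb', pvCompGetD hw2]; exact hlive w2 hw2
      · rw [hb', pvCompGetD hw1]; exact hlive w1 hw1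
    obtain ⟨hGB', hcol⟩ := pvRelabel_spec hB2 hga hgb hanb
    refine ⟨hGB', fun u v => ?_⟩
    rw [hcol u, hcol v]
    have hiff := pvCollapseIff (pvCompGet s2.1) (pvCompGet s2.1 w1) (pvCompGet s2.1 w2) rr.1 rr.2
      (by rwa [← pvCompGetD hw1, ← pvCompGetD hw2]) hanb u v
    rw [hiff]
    simp only [pvMerged, hg2]
  · rw [if_neg hne]
    rw [not_not] at hne
    refine ⟨hB2, fun u v => ?_⟩
    rw [pvMergedIffEq (f := pvCompGet comp)
      (by rw [← hg2 w1, ← hg2 w2, ← pvCompGetD hw1, ← pvCompGetD hw2]; exact hne) u v,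
      ← hg2 u, ← hg2 v]


-- ---------- A-side: add_synonyms merges the two classes ----------

lemma pvEnsure {P : PySem.Dict String String} (hG : GoodA P) (w : String) :
    GoodA (if P.contains w then P else P.insert w w) ∧
    (∀ u, pvRoot (if P.contains w then P else P.insert w w) u = pvRoot P u) ∧
    w ∈ (if P.contains w then P else P.insert w w).keys ∧
    (∀ u, u ∈ P.keys → u ∈ (if P.contains w then P else P.insert w w).keys) := by
  cases hc : P.contains w with
  | true =>
    rw [if_pos rfl]
    exact ⟨hG, fun _ => rfl, (PySem.Dict.contains_iff_mem_keys _ _).mp hc, fun _ h => h⟩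
  | false =>
    rw [if_neg (by simp)]
    have hw : w ∉ P.keys := pvNotMemKeys hc
    obtain ⟨hG', hR'⟩ := pvFreshInsert hG hw
    have hkeys : (P.insert w w).keys = P.keys ++ [w] :=
      PySem.Dict.keys_insert_of_not_contains _ _ hc
    refine ⟨hG', hR', ?_, ?_⟩
    · rw [hkeys]; exact List.mem_append_right _ (List.mem_singleton.mpr rfl)
    · intro u hu; rw [hkeys]; exact List.mem_append_left _ hu

lemma pvAddSyn_spec {P : PySem.Dict String String} (hG : GoodA P) (w1 w2 : String) :
    GoodA (pvAddSynonyms P w1 w2) ∧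
    ∀ u v, (pvRoot (pvAddSynonyms P w1 w2) u = pvRoot (pvAddSynonyms P w1 w2) v ↔
            pvMerged (pvRoot P) w1 w2 u v) := by
  simp only [pvAddSynonyms]
  set Pa := if P.contains w1 then P else P.insert w1 w1 with hPadef
  set Pb := if Pa.contains w2 then Pa else Pa.insert w2 w2 with hPbdef
  set g1 := pvGetRoot Pb w1 with hg1def
  set g2 := pvGetRoot g1.1 w2 with hg2def
  set rr := if g1.2 < g2.2 then (g2.2, g1.2) else (g1.2, g2.2) with hrrdef
  obtain ⟨hGa, hRa, hw1a, hmona⟩ := pvEnsure hG w1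
  obtain ⟨hGb, hRb, hw2b, hmonb⟩ := pvEnsure hGa w2
  rw [← hPadef] at hGa hRa hw1a hmona
  rw [← hPbdef] at hGb hRb hw2b hmonb
  have hw1b : w1 ∈ Pb.keys := hmonb _ hw1a
  obtain ⟨hv1, hG1, hR1, hk1, hs1⟩ := pvGetRoot_spec hGb w1
  rw [← hg1def] at hv1 hG1 hR1 hk1 hs1
  obtain ⟨hv2, hG2, hR2, hk2, hs2⟩ := pvGetRoot_spec hG1 w2
  rw [← hg2def] at hv2 hG2 hR2 hk2 hs2
  have hroots : ∀ u, pvRoot g2.1 u = pvRoot P u := by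
    intro u
    rw [hR2 u, hR1 u, hRb u, hRa u]
  have hr1 : g1.2 = pvRoot P w1 := by rw [hv1, hRb w1, hRa w1]
  have hr2 : g2.2 = pvRoot P w2 := by rw [hv2, hR1 w2, hRb w2, hRa w2]
  have hkg : g2.1.keys = Pb.keys := hk2.trans hk1
  have hw1g : w1 ∈ g2.1.keys := hkg ▸ hw1b
  have hw2g : w2 ∈ g2.1.keys := hkg ▸ hw2b
  have hlive : ∀ w, w ∈ g2.1.keys → g2.1.get? (pvRoot P w) = some (pvRoot P w) := by
    intro w hw
    have := pvRoot_key_isSelf hG2 hw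
    rwa [hroots w] at this
  have hab : (rr.1 = g1.2 ∧ rr.2 = g2.2) ∨ (rr.1 = g2.2 ∧ rr.2 = g1.2) := by
    rw [hrrdef]
    by_cases hc : g1.2 < g2.2
    · right; rw [if_pos hc]; exact ⟨rfl, rfl⟩
    · left; rw [if_neg hc]; exact ⟨rfl, rfl⟩
  have hlive1 : g2.1.get? rr.1 = some rr.1 := by
    rcases hab with ⟨h1, _⟩ | ⟨h1, _⟩
    · rw [h1, hr1]; exact hlive w1 hw1g
    · rw [h1, hr2]; exact hlive w2 hw2g
  have hlive2 : g2.1.get? rr.2 = some rr.2 := by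
    rcases hab with ⟨_, h2⟩ | ⟨_, h2⟩
    · rw [h2, hr2]; exact hlive w2 hw2g
    · rw [h2, hr1]; exact hlive w1 hw1g
  by_cases heq : g1.2 = g2.2
  · have h12 : rr.1 = rr.2 := by
      rcases hab with ⟨h1, h2⟩ | ⟨h1, h2⟩
      · rw [h1, h2, heq]
      · rw [h1, h2, heq]
    have hq : ∀ u, (g2.1.insert rr.2 rr.1).get? u = g2.1.get? u := by
      intro u
      rw [PySem.Dict.get?_insert]
      by_cases hu : u = rr.2
      · rw [if_pos hu, hu, hlive2, h12]
      · rw [if_neg hu]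
    have hkeys : (g2.1.insert rr.2 rr.1).keys = g2.1.keys :=
      PySem.Dict.keys_insert_of_contains _ _ (pvContains_of_mem (pvMemKeys hlive2))
    have hsize : (g2.1.insert rr.2 rr.1).size = g2.1.size := by
      rw [PySem.Dict.size_insert, if_pos (pvContains_of_mem (pvMemKeys hlive2))]
    have hG' : GoodA (g2.1.insert rr.2 rr.1) := pvGoodA_congr hq hkeys hG2
    have hR' : ∀ u, pvRoot (g2.1.insert rr.2 rr.1) u = pvRoot P u :=
      fun u => (pvRoot_congr hq hsize u).trans (hroots u)
    refine ⟨hG', fun u v => ?_⟩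
    rw [hR' u, hR' v,
      pvMergedIffEq (f := pvRoot P) (w1 := w1) (w2 := w2) (by rw [← hr1, ← hr2, heq]) u v]
  · have hxr : rr.2 ≠ rr.1 := by
      rcases hab with ⟨h1, h2⟩ | ⟨h1, h2⟩
      · intro h; exact heq (by rw [← h1, ← h2]; exact h.symm)
      · intro h; exact heq (by rw [← h2, ← h1]; exact h)
    obtain ⟨hG', hform, hkeys, hsize⟩ :=
      pvLinkInsert hG2 (pvMemKeys hlive2) hlive1 hxr (Or.inl hlive2)
    refine ⟨hG', fun u v => ?_⟩
    rw [hform u, hform v, hroots u, hroots v]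
    have hcoll := pvCollapseIff (pvRoot P) (pvRoot P w1) (pvRoot P w2) rr.1 rr.2
      (by
        rcases hab with ⟨h1, h2⟩ | ⟨h1, h2⟩
        · left; rw [h1, h2, hr1, hr2]; exact ⟨rfl, rfl⟩
        · right; rw [h1, h2, hr1, hr2]; exact ⟨rfl, rfl⟩)
      (Ne.symm hxr) u v
    exact hcoll

-- ---------- the joint preprocessing invariant ----------

lemma pvMergedCongr {f h : String → String} (hM : ∀ u v, f u = f v ↔ h u = h v)
    (w1 w2 u v : String) : pvMerged f w1 w2 u v ↔ pvMerged h w1 w2 u v := by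
  unfold pvMerged
  rw [iff_iff_eq.mpr (propext (hM u v)), iff_iff_eq.mpr (propext (hM u w1)),
    iff_iff_eq.mpr (propext (hM v w2)), iff_iff_eq.mpr (propext (hM u w2)),
    iff_iff_eq.mpr (propext (hM v w1))]

lemma pvPreFold :
    ∀ (sw : List (String × String)) (P : PySem.Dict String String)
      (comp : PySem.Dict String String) (members : PySem.Dict String (List String)),
      GoodA P → GoodB comp members →
      (∀ u v, pvRoot P u = pvRoot P v ↔ pvCompGet comp u = pvCompGet comp v) →
      GoodA (sw.foldl (fun P p => pvAddSynonyms P p.1 p.2) P) ∧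
      (∀ u v, pvRoot (sw.foldl (fun P p => pvAddSynonyms P p.1 p.2) P) u
              = pvRoot (sw.foldl (fun P p => pvAddSynonyms P p.1 p.2) P) v
            ↔ pvCompGet (sw.foldl (fun s p => pvMergeStep s p.1 p.2) (comp, members)).1 u
              = pvCompGet (sw.foldl (fun s p => pvMergeStep s p.1 p.2) (comp, members)).1 v) := by
  intro sw
  induction sw with
  | nil => intro P comp members hGA hGB hM; exact ⟨hGA, hM⟩
  | cons p sw ih =>
    intro P comp members hGA hGB hM
    obtain ⟨hGA', hrelA⟩ := pvAddSyn_spec hGA p.1 p.2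
    obtain ⟨hGB', hrelB⟩ := pvMergeStep_spec hGB p.1 p.2
    have hM' : ∀ u v,
        pvRoot (pvAddSynonyms P p.1 p.2) u = pvRoot (pvAddSynonyms P p.1 p.2) v ↔
        pvCompGet (pvMergeStep (comp, members) p.1 p.2).1 u
          = pvCompGet (pvMergeStep (comp, members) p.1 p.2).1 v := by
      intro u v
      rw [hrelA u v, hrelB u v]
      exact pvMergedCongr hM p.1 p.2 u v
    rw [List.foldl_cons, List.foldl_cons]
    exact ih (pvAddSynonyms P p.1 p.2) (pvMergeStep (comp, members) p.1 p.2).1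
      (pvMergeStep (comp, members) p.1 p.2).2 hGA' hGB' hM'

lemma pvGoodA_empty : GoodA PySem.Dict.empty := by
  refine ⟨fun k v h => ?_, fun _ => 0, fun k v h _ => ?_⟩ <;>
    rw [PySem.Dict.get?_empty] at h <;> cases h

lemma pvGoodB_empty : GoodB PySem.Dict.empty PySem.Dict.empty := by
  refine ⟨fun w r h => ?_, fun r h => ?_⟩ <;> rw [PySem.Dict.get?_empty] at h <;> cases h

lemma pvMatch_empty : ∀ u v,
    pvRoot PySem.Dict.empty u = pvRoot PySem.Dict.empty v ↔
    pvCompGet (PySem.Dict.empty : PySem.Dict String String) u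
      = pvCompGet (PySem.Dict.empty : PySem.Dict String String) v := by
  intro u v
  rw [pvRoot_of_none (PySem.Dict.get?_empty u), pvRoot_of_none (PySem.Dict.get?_empty v),
    pvG_none (PySem.Dict.get?_empty u), pvG_none (PySem.Dict.get?_empty v)]

-- ---------- the query phase ----------

lemma pvQueryLoop_spec {comp : PySem.Dict String String} :
    ∀ (ws1 ws2 : List String) (P : PySem.Dict String String), GoodA P →
      (∀ u v, pvRoot P u = pvRoot P v ↔ pvCompGet comp u = pvCompGet comp v) →
      ((pvQueryLoop P ws1 ws2).2
          = (ws1.zip ws2).all (fun p => p.1 == p.2 || (pvCompGet comp p.1 == pvCompGet comp p.2)) ∧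
       GoodA (pvQueryLoop P ws1 ws2).1 ∧
       (∀ u v, pvRoot (pvQueryLoop P ws1 ws2).1 u = pvRoot (pvQueryLoop P ws1 ws2).1 v ↔
               pvCompGet comp u = pvCompGet comp v)) := by
  intro ws1
  induction ws1 with
  | nil => intro ws2 P hG hM; simp [pvQueryLoop, hG, hM]
  | cons w1 t1 ih =>
    intro ws2 P hG hM
    cases ws2 with
    | nil => simp [pvQueryLoop, hG, hM]
    | cons w2 t2 =>
      rw [show pvQueryLoop P (w1 :: t1) (w2 :: t2)
          = (if w1 = w2 then pvQueryLoop P t1 t2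
             else if (pvAreSynonymous P w1 w2).2 then pvQueryLoop (pvAreSynonymous P w1 w2).1 t1 t2
             else ((pvAreSynonymous P w1 w2).1, false)) from rfl]
      by_cases hw : w1 = w2
      · rw [if_pos hw]
        obtain ⟨h1, h2, h3⟩ := ih t2 P hG hM
        refine ⟨?_, h2, h3⟩
        rw [h1, List.zip_cons_cons, List.all_cons]
        have : (w1 == w2 || (pvCompGet comp w1 == pvCompGet comp w2)) = true := by
          simp [hw]
        rw [this, Bool.true_and]
      · rw [if_neg hw]
        obtain ⟨hv, hGa, hRa⟩ := pvAreSyn_spec hG w1 w2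
        have hM2 : ∀ u v, pvRoot (pvAreSynonymous P w1 w2).1 u
            = pvRoot (pvAreSynonymous P w1 w2).1 v ↔
            pvCompGet comp u = pvCompGet comp v := by
          intro u v
          rw [hRa u, hRa v]; exact hM u v
        have hvb : (pvAreSynonymous P w1 w2).2
            = (pvCompGet comp w1 == pvCompGet comp w2) := by
          rw [hv, Bool.eq_iff_iff]
          simp only [beq_iff_eq]
          exact hM w1 w2
        have hhead : ((w1 :: t1).zip (w2 :: t2)).all
            (fun p => p.1 == p.2 || (pvCompGet comp p.1 == pvCompGet comp p.2))
            = ((pvAreSynonymous P w1 w2).2 &&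
               (t1.zip t2).all (fun p => p.1 == p.2 || (pvCompGet comp p.1 == pvCompGet comp p.2))) := by
          rw [List.zip_cons_cons, List.all_cons, hvb]
          have hww : (w1 == w2) = false := beq_eq_false_iff_ne.mpr hw
          rw [hww, Bool.false_or]
        cases hab : (pvAreSynonymous P w1 w2).2 with
        | true =>
          rw [hab] at hhead
          rw [if_pos rfl]
          obtain ⟨h1, h2, h3⟩ := ih t2 (pvAreSynonymous P w1 w2).1 hGa hM2
          refine ⟨?_, h2, h3⟩
          rw [h1, hhead, Bool.true_and]
        | false =>
          rw [hab] at hhead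
          rw [if_neg Bool.false_ne_true]
          exact ⟨by rw [hhead, Bool.false_and], hGa, hM2⟩

lemma pvQueriesFold {comp : PySem.Dict String String} :
    ∀ (qs : List (String × String)) (P : PySem.Dict String String) (acc : List Bool),
      GoodA P →
      (∀ u v, pvRoot P u = pvRoot P v ↔ pvCompGet comp u = pvCompGet comp v) →
      (qs.foldl (fun acc q =>
          let q1 := PySem.Str.split₀ q.1
          let q2 := PySem.Str.split₀ q.2
          if q1.length ≠ q2.length then (acc.1, acc.2 ++ [false])
          else
            let rb := pvQueryLoop acc.1 q1 q2
            (rb.1, acc.2 ++ [rb.2])) (P, acc)).2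
      = acc ++ qs.map (fun q =>
          (PySem.Str.split₀ q.1).length == (PySem.Str.split₀ q.2).length &&
          ((PySem.Str.split₀ q.1).zip (PySem.Str.split₀ q.2)).all
            (fun p => p.1 == p.2 || (pvCompGet comp p.1 == pvCompGet comp p.2))) := by
  intro qs
  induction qs with
  | nil => intro P acc hG hM; simp
  | cons q qs ih =>
    intro P acc hG hM
    show (qs.foldl _
        (if (PySem.Str.split₀ q.1).length ≠ (PySem.Str.split₀ q.2).length
          then (P, acc ++ [false])
          else ((pvQueryLoop P (PySem.Str.split₀ q.1) (PySem.Str.split₀ q.2)).1,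
                acc ++ [(pvQueryLoop P (PySem.Str.split₀ q.1) (PySem.Str.split₀ q.2)).2]))).2 = _
    by_cases hlen : (PySem.Str.split₀ q.1).length ≠ (PySem.Str.split₀ q.2).length
    · rw [if_pos hlen, ih P (acc ++ [false]) hG hM, List.map_cons, List.append_assoc]
      have : ((PySem.Str.split₀ q.1).length == (PySem.Str.split₀ q.2).length) = false :=
        beq_eq_false_iff_ne.mpr hlen
      rw [this, Bool.false_and]
      rfl
    · rw [not_not] at hlen
      rw [if_neg (by simpa using hlen)]
      obtain ⟨h1, h2, h3⟩ := pvQueryLoop_spec (PySem.Str.split₀ q.1) (PySem.Str.split₀ q.2) P hG hM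
      rw [ih _ (acc ++ [(pvQueryLoop P (PySem.Str.split₀ q.1) (PySem.Str.split₀ q.2)).2]) h2 h3,
        List.map_cons, List.append_assoc]
      have hb : ((PySem.Str.split₀ q.1).length == (PySem.Str.split₀ q.2).length) = true :=
        beq_iff_eq.mpr hlen
      rw [hb, Bool.true_and, h1]
      rfl

-- ===== VERDICT (by name: the statement is the Claim_ definition above) =====
set_option maxHeartbeats 1000000 in
theorem synonym_queries_spec : Claim_equal_synonym_queries := by
  unfold Claim_equal_synonym_queries
  intro sw qs _
  unfold Spec_synonym_queries
  show synonym_queries sw qs = synonym_queries_alt sw qs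
  have hGA : GoodA (sw.foldl (fun P p => pvAddSynonyms P p.1 p.2) PySem.Dict.empty) :=
    (pvPreFold sw _ _ _ pvGoodA_empty pvGoodB_empty pvMatch_empty).1
  have hM : ∀ u v,
      pvRoot (sw.foldl (fun P p => pvAddSynonyms P p.1 p.2) PySem.Dict.empty) u
        = pvRoot (sw.foldl (fun P p => pvAddSynonyms P p.1 p.2) PySem.Dict.empty) v ↔
      pvCompGet (sw.foldl (fun s p => pvMergeStep s p.1 p.2) (PySem.Dict.empty, PySem.Dict.empty)).1 u
        = pvCompGet (sw.foldl (fun s p => pvMergeStep s p.1 p.2) (PySem.Dict.empty, PySem.Dict.empty)).1 v :=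
    (pvPreFold sw _ _ _ pvGoodA_empty pvGoodB_empty pvMatch_empty).2
  rw [show synonym_queries sw qs
      = (qs.foldl (fun acc q =>
          let q1 := PySem.Str.split₀ q.1
          let q2 := PySem.Str.split₀ q.2
          if q1.length ≠ q2.length then (acc.1, acc.2 ++ [false])
          else
            let rb := pvQueryLoop acc.1 q1 q2
            (rb.1, acc.2 ++ [rb.2]))
          (sw.foldl (fun P p => pvAddSynonyms P p.1 p.2) PySem.Dict.empty, ([] : List Bool))).2
      from rfl]
  rw [show synonym_queries_alt sw qs
      = qs.map (fun q =>
          (PySem.Str.split₀ q.1).length == (PySem.Str.split₀ q.2).length &&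
          ((PySem.Str.split₀ q.1).zip (PySem.Str.split₀ q.2)).all
            (fun p => p.1 == p.2 ||
              (pvCompGet (sw.foldl (fun s p => pvMergeStep s p.1 p.2) (PySem.Dict.empty, PySem.Dict.empty)).1 p.1
                == pvCompGet (sw.foldl (fun s p => pvMergeStep s p.1 p.2) (PySem.Dict.empty, PySem.Dict.empty)).1 p.2)))
      from rfl]
  revert hGA hM
  generalize (sw.foldl (fun P p => pvAddSynonyms P p.1 p.2) PySem.Dict.empty) = PP
  generalize (sw.foldl (fun s p => pvMergeStep s p.1 p.2) (PySem.Dict.empty, PySem.Dict.empty)).1 = CC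
  intro hGA hM
  exact (pvQueriesFold qs PP [] hGA hM).trans (List.nil_append _)
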